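-- pv_equiv track=rewrite | github.com/minacle/python-irc | irc.py | stia
-- ===== SOURCE A (Python) =====
-- def stia(text): # string to irc args
-- 	ext = []
-- 	s = text.split(u" ")
-- 	i = -1
-- 	for w in s:
-- 		i += 1
-- 		if w.startswith(u":"):
-- 			ext.append(u" ".join(s[i:]))
-- 			break
-- 		else:
-- 			ext.append(w)
-- 	return ext
-- ===== SOURCE B (Python) =====
-- def stia(text): # string to irc args
-- 	if text.startswith(u":"):
-- 		return [text]
-- 	idx = text.find(u" :")
-- 	if idx == -1:
-- 		return text.split(u" ")
-- 	return text[:idx].split(u" ") + [text[idx + 1:]]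
-- ===== Notes on version B (the rewrite author's own statement) =====
-- stated objective: alternative
-- what changed: Replaces the split-then-scan-tokens-with-break loop by a direct substring search: handle a leading colon up front, locate the first space-then-colon boundary with one str.find, and slice the string once around it.
import Mathlib
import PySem

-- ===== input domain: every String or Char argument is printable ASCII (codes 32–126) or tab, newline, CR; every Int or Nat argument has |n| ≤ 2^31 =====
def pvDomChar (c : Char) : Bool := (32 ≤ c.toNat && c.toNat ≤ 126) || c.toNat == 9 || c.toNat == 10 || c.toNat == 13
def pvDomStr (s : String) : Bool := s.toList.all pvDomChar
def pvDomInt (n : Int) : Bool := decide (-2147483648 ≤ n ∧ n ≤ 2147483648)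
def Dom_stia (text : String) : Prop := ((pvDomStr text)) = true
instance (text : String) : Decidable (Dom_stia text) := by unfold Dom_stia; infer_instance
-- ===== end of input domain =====

-- B replaces A's split-then-scan-tokens-with-break loop by one substring search for the space-then-colon boundary and a single slice (alternative algorithm, same O(n) cost).

-- ===== PORT A =====
-- the for-loop over the split tokens, with the running index i and the break encoded as recursion stopping
def stiaGo (s : List (List Char)) (rem : List (List Char)) (i : Int) (ext : List (List Char)) :
    List (List Char) :=
  match rem with
  | [] => ext
  | w :: t =>
    if PySem.Chars.startswith w [':'] then
      ext ++ [PySem.Chars.join [' '] (PySem.List.slice s (some (i + 1)) none)]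
    else stiaGo s t (i + 1) (ext ++ [w])

def stia (text : String) : List String :=
  let s := PySem.Chars.splitOn text.toList [' ']
  (stiaGo s s (-1) []).map String.ofList

-- ===== PORT B =====
def stia_alt (text : String) : List String :=
  if PySem.Chars.startswith text.toList [':'] then [text]
  else
    let idx := PySem.Chars.find text.toList [' ', ':']
    if idx = -1 then (PySem.Chars.splitOn text.toList [' ']).map String.ofList
    else (PySem.Chars.splitOn (PySem.List.slice text.toList none (some idx)) [' ']).map String.ofList
      ++ [String.ofList (PySem.List.slice text.toList (some (idx + 1)) none)]

-- ===== PRECONDITION & SPEC =====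
def Spec_stia (text : String) (out : List String) : Prop := out = stia_alt text
instance (text : String) (out : List String) : Decidable (Spec_stia text out) := by unfold Spec_stia; infer_instance

-- ===== CLAIM (what is proved, stated in full; the proofs are below) =====
def Claim_equal_stia : Prop := ∀ (text : String), Dom_stia text → Spec_stia text (stia text)

-- ===== LEMMAS AND PROOFS =====

-- `msp pre cs` is Python's cs.split(" ") with the partial current word `pre` accumulated in front
def msp (pre : List Char) : List Char → List (List Char)
  | [] => [pre]
  | a :: x => if a = ' ' then pre :: msp [] x else msp (pre ++ [a]) x

theorem splitOn_go_eq (fuel : Nat) (l cur : List Char) (acc : List (List Char))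
    (h : l.length < fuel) :
    PySem.Chars.splitOn.go [' '] fuel l cur acc = acc.reverse ++ msp cur.reverse l := by
  induction fuel generalizing l cur acc with
  | zero => omega
  | succ fuel ih =>
    cases l with
    | nil => simp [PySem.Chars.splitOn.go, msp]
    | cons c rest =>
      simp only [PySem.Chars.splitOn.go, List.isPrefixOf, msp]
      by_cases hc : c = ' '
      · simp [hc, ih rest [] (cur.reverse :: acc) (by simp at h ⊢; omega)]
      · simp [Ne.symm hc, hc, ih rest (c :: cur) acc (by simp at h ⊢; omega)]

theorem splitOn_eq (cs : List Char) : PySem.Chars.splitOn cs [' '] = msp [] cs := by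
  unfold PySem.Chars.splitOn
  simpa using splitOn_go_eq (cs.length + 1) cs [] [] (by omega)

theorem msp_ne_nil (cs : List Char) (pre : List Char) : msp pre cs ≠ [] := by
  induction cs generalizing pre with
  | nil => simp [msp]
  | cons a x ih => by_cases h : a = ' ' <;> simp [msp, h, ih]

theorem join_msp (cs : List Char) (pre : List Char) :
    PySem.Chars.join [' '] (msp pre cs) = pre ++ cs := by
  induction cs generalizing pre with
  | nil => simp [msp, PySem.Chars.join_singleton]
  | cons a x ih =>
    by_cases h : a = ' '
    · obtain ⟨u, t, hut⟩ : ∃ u t, msp ([] : List Char) x = u :: t :=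
        match hx : msp [] x with
        | [] => absurd hx (msp_ne_nil x [])
        | u :: t => ⟨u, t, rfl⟩
      simp only [msp]; rw [if_pos h, hut]
      have := ih []; rw [hut] at this
      rw [PySem.Chars.join_cons_cons, this]; simp [h]
    · simp [msp, h, ih]

theorem msp_no_space (cs : List Char) (pre : List Char) (hp : ' ' ∉ pre) :
    ∀ w ∈ msp pre cs, ' ' ∉ w := by
  induction cs generalizing pre with
  | nil => simpa [msp] using hp
  | cons a x ih =>
    by_cases h : a = ' '
    · simp only [msp, h, if_true]
      intro w hw
      rcases List.mem_cons.mp hw with rfl | hw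
      · exact hp
      · exact ih [] (by simp) w hw
    · simp only [msp, if_neg h]
      exact ih (pre ++ [a]) (by simp [hp, Ne.symm h])

theorem msp_append_space (w x : List Char) (pre : List Char) (hw : ' ' ∉ w) :
    msp pre (w ++ ' ' :: x) = (pre ++ w) :: msp [] x := by
  induction w generalizing pre with
  | nil => simp [msp]
  | cons a v ih =>
    have ha : a ≠ ' ' := by intro h; exact hw (h ▸ List.mem_cons_self)
    simp [msp, ha, ih (pre ++ [a]) (fun h => hw (List.mem_cons_of_mem a h))]

theorem msp_no_space_eq (w : List Char) (pre : List Char) (hw : ' ' ∉ w) :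
    msp pre w = [pre ++ w] := by
  induction w generalizing pre with
  | nil => simp [msp]
  | cons a v ih =>
    have ha : a ≠ ' ' := by intro h; exact hw (h ▸ List.mem_cons_self)
    simp [msp, ha, ih (pre ++ [a]) (fun h => hw (List.mem_cons_of_mem a h))]

theorem splitOn_no_space (w : List Char) (hw : ' ' ∉ w) :
    PySem.Chars.splitOn w [' '] = [w] := by
  rw [splitOn_eq, msp_no_space_eq w [] hw]; rfl

theorem splitOn_append_space (w x : List Char) (hw : ' ' ∉ w) :
    PySem.Chars.splitOn (w ++ ' ' :: x) [' '] = w :: PySem.Chars.splitOn x [' '] := by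
  rw [splitOn_eq, splitOn_eq, msp_append_space w x [] hw]; rfl

-- find cs " :" points at the first occurrence; a uniqueness converse of PySem.Chars.find_spec
theorem find_eq_of (cs sub : List Char) (n : Nat) (h1 : sub <+: cs.drop n)
    (h2 : ∀ i < n, ¬ sub <+: cs.drop i) : PySem.Chars.find cs sub = (n : Int) := by
  have hin : sub <:+: cs := h1.isInfix.trans (List.drop_suffix n cs).isInfix
  have hnn : 0 ≤ PySem.Chars.find cs sub := (PySem.Chars.find_nonneg_iff cs sub).mpr hin
  obtain ⟨hp, hmin⟩ := PySem.Chars.find_spec hnn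
  set m := (PySem.Chars.find cs sub).toNat with hm
  rcases lt_trichotomy m n with h | h | h
  · exact absurd hp (h2 m h)
  · omega
  · exact absurd h1 (hmin n h)

theorem two_prefix_iff (a b : Char) (l : List Char) :
    [a, b] <+: l ↔ ∃ r, l = a :: b :: r := by
  constructor
  · rintro ⟨r, rfl⟩; exact ⟨r, rfl⟩
  · rintro ⟨r, rfl⟩; exact ⟨r, rfl⟩

theorem no_occ_in_word (w cs' : List Char) (hw : ' ' ∉ w) (i : Nat) (hi : i < w.length) :
    ¬ [' ', ':'] <+: (w ++ ' ' :: cs').drop i := by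
  intro h
  rw [two_prefix_iff] at h
  obtain ⟨r, hr⟩ := h
  have hdrop : (w ++ ' ' :: cs').drop i = w.drop i ++ ' ' :: cs' := by
    rw [List.drop_append_of_le_length (by omega)]
  rw [hdrop] at hr
  have hne : w.drop i ≠ [] := by simp [List.drop_eq_nil_iff]; omega
  cases hd : w.drop i with
  | nil => exact hne hd
  | cons a r' =>
    rw [hd] at hr
    have : a = ' ' := by simpa using congrArg List.head? hr
    exact hw (this ▸ (List.mem_of_mem_drop (hd ▸ List.mem_cons_self)))

theorem drop_at_boundary (w cs' : List Char) :
    (w ++ ' ' :: cs').drop w.length = ' ' :: cs' := by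
  simp

theorem drop_past_boundary (w cs' : List Char) (j : Nat) :
    (w ++ ' ' :: cs').drop (w.length + 1 + j) = cs'.drop j := by
  have h : w.length + 1 + j = w.length + (1 + j) := by omega
  rw [h, List.drop_append]
  simp [Nat.one_add]

theorem take_past_boundary (w cs' : List Char) (j : Nat) :
    (w ++ ' ' :: cs').take (w.length + 1 + j) = w ++ ' ' :: cs'.take j := by
  have h : w.length + 1 + j = w.length + (1 + j) := by omega
  rw [h, List.take_append]
  simp [Nat.one_add]

theorem infix_exists_drop (sub s : List Char) (h : sub <:+: s) : ∃ i, sub <+: s.drop i := by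
  obtain ⟨l, r, hlr⟩ := h
  refine ⟨l.length, ?_⟩
  rw [← hlr, List.append_assoc, List.drop_left]
  exact ⟨r, rfl⟩

theorem find_no_space (w : List Char) (hw : ' ' ∉ w) :
    PySem.Chars.find w [' ', ':'] = -1 := by
  rw [PySem.Chars.find_eq_neg_one_iff]
  rintro ⟨l, r, hlr⟩
  exact hw (by rw [← hlr]; simp)

-- where " :" first occurs in w + " " + cs' (w space-free)
theorem find_append_space (w cs' : List Char) (hw : ' ' ∉ w) :
    PySem.Chars.find (w ++ ' ' :: cs') [' ', ':'] =
      if PySem.Chars.startswith cs' [':'] then (w.length : Int)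
      else if PySem.Chars.find cs' [' ', ':'] = -1 then -1
      else (w.length : Int) + 1 + PySem.Chars.find cs' [' ', ':'] := by
  by_cases hc : PySem.Chars.startswith cs' [':']
  · rw [if_pos hc]
    apply find_eq_of
    · rw [drop_at_boundary]
      obtain ⟨r, hr⟩ := (PySem.Chars.startswith_iff cs' [':']).mp hc
      exact ⟨r, by rw [← hr]; rfl⟩
    · intro i hi; exact no_occ_in_word w cs' hw i hi
  · rw [if_neg hc]
    have hcolon : ¬ [' ', ':'] <+: (' ' :: cs') := by
      intro h
      rw [two_prefix_iff] at h
      obtain ⟨r, hr⟩ := h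
      apply hc
      rw [PySem.Chars.startswith_iff]
      exact ⟨r, by injection hr with _ h2; simp [h2]⟩
    by_cases hf : PySem.Chars.find cs' [' ', ':'] = -1
    · rw [if_pos hf]
      rw [PySem.Chars.find_eq_neg_one_iff] at hf ⊢
      intro hinf
      obtain ⟨i, hi⟩ := infix_exists_drop _ _ hinf
      rcases lt_trichotomy i w.length with h | h | h
      · exact no_occ_in_word w cs' hw i h hi
      · rw [h, drop_at_boundary] at hi; exact hcolon hi
      · have hj : i = w.length + 1 + (i - w.length - 1) := by omega
        rw [hj, drop_past_boundary] at hi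
        exact hf (hi.isInfix.trans (List.drop_suffix _ cs').isInfix)
    · rw [if_neg hf]
      have hnn : 0 ≤ PySem.Chars.find cs' [' ', ':'] := by
        rcases (lt_or_eq_of_le (PySem.Chars.neg_one_le_find cs' [' ', ':'])) with h | h
        · omega
        · exact absurd h.symm hf
      obtain ⟨hp, hmin⟩ := PySem.Chars.find_spec hnn
      set n := (PySem.Chars.find cs' [' ', ':']).toNat with hn
      have hcast : PySem.Chars.find cs' [' ', ':'] = (n : Int) := by omega
      rw [hcast]
      have hc2 : (w.length : Int) + 1 + (n : Int) = ((w.length + 1 + n : Nat) : Int) := by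
        push_cast; ring
      rw [hc2]
      apply find_eq_of
      · rw [drop_past_boundary]; exact hp
      · intro i hi
        rcases lt_trichotomy i w.length with h | h | h
        · exact no_occ_in_word w cs' hw i h
        · rw [h, drop_at_boundary]; exact hcolon
        · have hj : i = w.length + 1 + (i - w.length - 1) := by omega
          rw [hj, drop_past_boundary]
          exact hmin _ (by omega)

theorem startswith_append_space (w r : List Char) :
    PySem.Chars.startswith (w ++ ' ' :: r) [':'] = PySem.Chars.startswith w [':'] := by
  cases w <;> simp [PySem.Chars.startswith, List.isPrefixOf]

-- the loop result, as a clean recursion over the token list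
def aRun : List (List Char) → List (List Char)
  | [] => []
  | w :: t =>
    if PySem.Chars.startswith w [':'] then [PySem.Chars.join [' '] (w :: t)]
    else w :: aRun t

theorem stiaGo_eq_aRun (rem : List (List Char)) :
    ∀ (s : List (List Char)) (j : Nat) (ext : List (List Char)), s.drop j = rem →
      stiaGo s rem ((j : Int) - 1) ext = ext ++ aRun rem := by
  induction rem with
  | nil => intro s j ext _; simp [stiaGo, aRun]
  | cons w t ih =>
    intro s j ext hdrop
    rw [stiaGo, aRun]
    have hj : (j : Int) - 1 + 1 = (j : Int) := by ring
    by_cases hc : PySem.Chars.startswith w [':']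
    · rw [if_pos hc, if_pos hc, hj, PySem.List.slice_from s (Int.natCast_nonneg j)]
      simp [hdrop]
    · rw [if_neg hc, if_neg hc, hj]
      have hnext : s.drop (j + 1) = t := by
        have h1 := congrArg List.tail hdrop
        rw [List.tail_drop] at h1
        simpa using h1
      have := ih s (j + 1) (ext ++ [w]) hnext
      rw [show ((j : Int)) = ((j + 1 : Nat) : Int) - 1 by push_cast; ring]
      rw [this]
      simp

theorem startswith_join (u : List Char) (t' : List (List Char)) :
    PySem.Chars.startswith (PySem.Chars.join [' '] (u :: t')) [':'] =
      PySem.Chars.startswith u [':'] := by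
  cases t' with
  | nil => rw [PySem.Chars.join_singleton]
  | cons v t'' =>
    rw [PySem.Chars.join_cons_cons]
    rw [List.append_assoc]
    exact startswith_append_space u _

theorem core (t : List (List Char)) : ∀ w : List Char, ' ' ∉ w → (∀ u ∈ t, ' ' ∉ u) →
    PySem.Chars.startswith w [':'] = false →
    (if PySem.Chars.find (PySem.Chars.join [' '] (w :: t)) [' ', ':'] = -1 then
       PySem.Chars.splitOn (PySem.Chars.join [' '] (w :: t)) [' ']
     else
       PySem.Chars.splitOn
         (PySem.List.slice (PySem.Chars.join [' '] (w :: t)) none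
           (some (PySem.Chars.find (PySem.Chars.join [' '] (w :: t)) [' ', ':']))) [' '] ++
       [PySem.List.slice (PySem.Chars.join [' '] (w :: t))
           (some (PySem.Chars.find (PySem.Chars.join [' '] (w :: t)) [' ', ':'] + 1)) none])
    = aRun (w :: t) := by
  induction t with
  | nil =>
    intro w hw _ hcw
    rw [PySem.Chars.join_singleton, find_no_space w hw, if_pos rfl]
    rw [splitOn_no_space w hw, aRun, if_neg (by simp [hcw]), aRun]
  | cons u t' ih =>
    intro w hw hall hcw
    have hu : ' ' ∉ u := hall u List.mem_cons_self
    have hall' : ∀ v ∈ t', ' ' ∉ v := fun v hv => hall v (List.mem_cons_of_mem u hv)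
    have hjoin : PySem.Chars.join [' '] (w :: u :: t') =
        w ++ ' ' :: PySem.Chars.join [' '] (u :: t') := by
      rw [PySem.Chars.join_cons_cons, List.append_assoc]; rfl
    set cs' := PySem.Chars.join [' '] (u :: t') with hcs'
    rw [hjoin, find_append_space w cs' hw]
    have hncw : ¬ (PySem.Chars.startswith w [':'] = true) := by simp [hcw]
    rw [aRun, if_neg hncw]
    by_cases hcu : PySem.Chars.startswith u [':']
    · have hcu' : PySem.Chars.startswith cs' [':'] = true := by rw [hcs', startswith_join]; exact hcu
      rw [if_pos hcu']
      have hne : ¬ ((w.length : Int) = -1) := by omega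
      rw [if_neg hne]
      rw [PySem.List.slice_to _ (Int.natCast_nonneg _), Int.toNat_natCast, List.take_left]
      rw [splitOn_no_space w hw]
      rw [PySem.List.slice_from _ (by omega : (0:Int) ≤ (w.length : Int) + 1)]
      rw [show ((w.length : Int) + 1).toNat = w.length + 1 + 0 from by omega]
      rw [drop_past_boundary, List.drop_zero]
      rw [aRun, if_pos hcu]
      rfl
    · have hcu' : ¬ (PySem.Chars.startswith cs' [':'] = true) := by
        rw [hcs', startswith_join]; exact hcu
      have hcuf : PySem.Chars.startswith u [':'] = false := by simpa using hcu
      rw [if_neg hcu']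
      have hih := ih u hu hall' hcuf
      rw [← hcs'] at hih
      by_cases hf : PySem.Chars.find cs' [' ', ':'] = -1
      · rw [if_pos hf]
        have h1 : ((-1 : Int) = -1) := rfl
        rw [if_pos h1]
        rw [splitOn_append_space w cs' hw]
        rw [if_pos hf] at hih
        rw [hih]
      · rw [if_neg hf]
        rw [if_neg hf] at hih
        have hnn : 0 ≤ PySem.Chars.find cs' [' ', ':'] := by
          have := PySem.Chars.neg_one_le_find cs' [' ', ':']
          omega
        set n := (PySem.Chars.find cs' [' ', ':']).toNat with hn
        have hcast : PySem.Chars.find cs' [' ', ':'] = (n : Int) := by omega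
        rw [hcast] at hih ⊢
        have h1 : (w.length : Int) + 1 + (n : Int) = ((w.length + 1 + n : Nat) : Int) := by
          push_cast; ring
        rw [h1]
        have hne2 : ¬ (((w.length + 1 + n : Nat) : Int) = -1) := by omega
        rw [if_neg hne2]
        rw [PySem.List.slice_to _ (Int.natCast_nonneg _), Int.toNat_natCast, take_past_boundary]
        rw [splitOn_append_space w _ hw]
        rw [PySem.List.slice_from _ (by omega : (0:Int) ≤ ((w.length + 1 + n : Nat) : Int) + 1)]
        rw [show (((w.length + 1 + n : Nat) : Int) + 1).toNat = w.length + 1 + (n + 1) from by omega]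
        rw [drop_past_boundary]
        rw [PySem.List.slice_to _ (Int.natCast_nonneg _), Int.toNat_natCast] at hih
        rw [PySem.List.slice_from _ (by omega : (0:Int) ≤ ((n : Nat) : Int) + 1)] at hih
        rw [show (((n : Nat) : Int) + 1).toNat = n + 1 from by omega] at hih
        rw [List.cons_append, hih]

theorem main_chars (cs : List Char) :
    (if PySem.Chars.startswith cs [':'] then [cs]
     else if PySem.Chars.find cs [' ', ':'] = -1 then PySem.Chars.splitOn cs [' ']
     else PySem.Chars.splitOn (PySem.List.slice cs none (some (PySem.Chars.find cs [' ', ':']))) [' '] ++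
       [PySem.List.slice cs (some (PySem.Chars.find cs [' ', ':'] + 1)) none])
    = aRun (PySem.Chars.splitOn cs [' ']) := by
  have hne : PySem.Chars.splitOn cs [' '] ≠ [] := by
    rw [splitOn_eq]; exact msp_ne_nil cs []
  obtain ⟨w, t, hwt⟩ := List.exists_cons_of_ne_nil hne
  have hjoin : PySem.Chars.join [' '] (w :: t) = cs := by
    rw [← hwt, splitOn_eq, join_msp]; rfl
  have hnos : ∀ u ∈ w :: t, ' ' ∉ u := by
    rw [← hwt, splitOn_eq]; exact msp_no_space cs [] (by simp)
  have hw : ' ' ∉ w := hnos w List.mem_cons_self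
  have hstarts : PySem.Chars.startswith cs [':'] = PySem.Chars.startswith w [':'] := by
    rw [← hjoin, startswith_join]
  by_cases hcw : PySem.Chars.startswith w [':'] = true
  · have h1 : PySem.Chars.startswith cs [':'] = true := by rw [hstarts]; exact hcw
    rw [if_pos h1, hwt, aRun, if_pos hcw, hjoin]
  · have hcwf : PySem.Chars.startswith w [':'] = false := by simpa using hcw
    have h1 : ¬ (PySem.Chars.startswith cs [':'] = true) := by rw [hstarts]; exact hcw
    rw [if_neg h1]
    have hcore := core t w hw (fun u hu => hnos u (List.mem_cons_of_mem w hu)) hcwf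
    rw [hjoin] at hcore
    conv_rhs => rw [hwt]
    exact hcore

-- ===== VERDICT (by name: the statement is the Claim_ definition above) =====
theorem stia_spec : Claim_equal_stia := by
  intro text _
  unfold Spec_stia
  simp only [stia, stia_alt]
  have hgo := stiaGo_eq_aRun (PySem.Chars.splitOn text.toList [' '])
      (PySem.Chars.splitOn text.toList [' ']) 0 [] (by simp)
  simp only [Nat.cast_zero, zero_sub, List.nil_append] at hgo
  rw [hgo, ← main_chars text.toList]
  by_cases h1 : PySem.Chars.startswith text.toList [':']
  · rw [if_pos h1, if_pos h1]
    simp [String.ofList_toList]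
  · rw [if_neg h1, if_neg h1]
    by_cases h2 : PySem.Chars.find text.toList [' ', ':'] = -1
    · rw [if_pos h2, if_pos h2]
    · rw [if_neg h2, if_neg h2]
      simp
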